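-- pv_equiv track=rewrite | github.com/samnooij/Rosalind_problems | scripts/LCSM-Finding_a_shared_motif.py | compare_overlaps
-- ===== SOURCE A (Python) =====
-- def compare_overlaps(motif_list, seq):
--     """
-- Compare the current sequence (from 3 to k) to the list of overlaps (motifs) that have been found to far.
--     """
--     common_substrings = []
--     #Keep track of the substrings that are common between the
--     # motif list and the current sequence.
--
--     for motif in motif_list:
--         #For each motif previously identified
--         if motif in seq:
--             #Check if it exists in the current sequence
--             common_substrings.append(motif)
--             #and save it if it is.
--         else:
--             #Otherwise, it is no longer common between all sequences,
--             # so pass. Do not track this motif any longer.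
--             pass
--
--     #Return only substrings/motifs that are shared with the current sequence.
--     return(common_substrings)
-- ===== SOURCE B (Python) =====
-- def compare_overlaps(motif_list, seq):
--     """Same filter, but instead of scanning seq once per motif, precompute one
--     hash set of all substrings of seq no longer than the longest motif, then
--     filter the motif list by a set lookup per motif."""
--     n = len(seq)
--     maxlen = 0
--     for m in motif_list:
--         if len(m) > maxlen:
--             maxlen = len(m)
--     subs = set()
--     for i in range(n + 1):
--         for j in range(i, min(i + maxlen, n) + 1):
--             subs.add(seq[i:j])
--     return [m for m in motif_list if m in subs]
-- ===== Notes on version B (the rewrite author's own statement) =====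
-- stated objective: faster
-- what changed: Instead of scanning seq once per motif with 'in', B precomputes one hash set of all substrings of seq no longer than the longest motif and filters the motif list by a set lookup per motif.
import Mathlib
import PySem

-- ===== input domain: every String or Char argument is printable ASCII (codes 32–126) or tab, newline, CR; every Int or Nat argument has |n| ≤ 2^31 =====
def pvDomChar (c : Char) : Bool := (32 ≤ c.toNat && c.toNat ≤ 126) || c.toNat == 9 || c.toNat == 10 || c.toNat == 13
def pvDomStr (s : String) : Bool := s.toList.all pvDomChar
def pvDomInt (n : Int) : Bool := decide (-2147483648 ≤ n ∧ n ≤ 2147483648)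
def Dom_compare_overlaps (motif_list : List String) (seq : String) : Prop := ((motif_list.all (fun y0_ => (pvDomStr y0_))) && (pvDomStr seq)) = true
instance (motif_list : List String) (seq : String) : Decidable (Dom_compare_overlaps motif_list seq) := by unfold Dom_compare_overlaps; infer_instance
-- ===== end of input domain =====

-- B replaces A's per-motif substring scan of seq by one precomputed hash set of
-- the substrings of seq no longer than the longest motif; each motif is then a
-- single set lookup.

-- ===== PORT A =====
-- for motif in motif_list: if motif in seq: common_substrings.append(motif)
def compare_overlaps (motif_list : List String) (seq : String) : List String :=
  motif_list.foldl
    (fun common_substrings motif =>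
      if PySem.Str.isIn motif seq then common_substrings ++ [motif]
      else common_substrings)
    []

-- ===== PORT B =====
-- maxlen = longest motif length; subs = set of seq[i:j] for 0 <= i <= j <= min(i+maxlen, n);
-- then filter the motif list by set membership
def compare_overlaps_alt (motif_list : List String) (seq : String) : List String :=
  let n := PySem.Str.len seq
  let maxlen := motif_list.foldl
    (fun maxlen m => if PySem.Str.len m > maxlen then PySem.Str.len m else maxlen) 0
  let subs : PySem.Set String :=
    (PySem.List.pyRange 0 (n + 1) 1).foldl
      (fun subs i =>
        (PySem.List.pyRange i (min (i + maxlen) n + 1) 1).foldl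
          (fun subs j => subs.add (PySem.Str.slice seq (some i) (some j)))
          subs)
      PySem.Set.empty
  motif_list.filter (fun m => subs.contains m)

-- ===== PRECONDITION & SPEC =====
def Spec_compare_overlaps (motif_list : List String) (seq : String) (out : List String) : Prop := out = compare_overlaps_alt motif_list seq
instance (motif_list : List String) (seq : String) (out : List String) : Decidable (Spec_compare_overlaps motif_list seq out) := by unfold Spec_compare_overlaps; infer_instance

-- ===== CLAIM (what is proved, stated in full; the proofs are below) =====
def Claim_equal_compare_overlaps : Prop := ∀ (motif_list : List String) (seq : String), Dom_compare_overlaps motif_list seq → Spec_compare_overlaps motif_list seq (compare_overlaps motif_list seq)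

-- ===== LEMMAS AND PROOFS =====

-- membership in a fold of Set.add over a list
theorem mem_foldl_add {α β : Type} [BEq α] [LawfulBEq α] (f : β → α) (l : List β)
    (s : PySem.Set α) (x : α) :
    x ∈ l.foldl (fun s b => s.add (f b)) s ↔ x ∈ s ∨ ∃ b ∈ l, f b = x := by
  rw [← PySem.Set.update_map_eq_foldl_add, PySem.Set.mem_update, List.mem_map]

-- membership in the nested fold B builds
theorem mem_foldl_foldl_add {α β γ : Type} [BEq α] [LawfulBEq α]
    (f : β → γ → α) (g : β → List γ) (l : List β) (s : PySem.Set α) (x : α) :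
    x ∈ l.foldl (fun s i => (g i).foldl (fun s j => s.add (f i j)) s) s ↔
      x ∈ s ∨ ∃ i ∈ l, ∃ j ∈ g i, f i j = x := by
  induction l generalizing s with
  | nil => simp
  | cons a l ih =>
    simp only [List.foldl_cons, ih, mem_foldl_add, List.mem_cons]
    constructor
    · rintro ((h | ⟨j, hj, rfl⟩) | ⟨i, hi, j, hj, rfl⟩)
      · exact Or.inl h
      · exact Or.inr ⟨a, Or.inl rfl, j, hj, rfl⟩
      · exact Or.inr ⟨i, Or.inr hi, j, hj, rfl⟩
    · rintro (h | ⟨i, (rfl | hi), j, hj, rfl⟩)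
      · exact Or.inl (Or.inl h)
      · exact Or.inl (Or.inr ⟨j, hj, rfl⟩)
      · exact Or.inr ⟨i, hi, j, hj, rfl⟩

-- a {drop,take} window is an infix
theorem take_drop_infix {α : Type} (xs : List α) (a b : Nat) :
    (xs.drop a).take b <:+: xs :=
  ((List.take_prefix b (xs.drop a)).isInfix).trans (xs.drop_suffix a).isInfix

-- the maxlen fold only grows
theorem foldl_max_ge_acc (l : List String) (acc : Int) :
    acc ≤ l.foldl (fun maxlen m => if PySem.Str.len m > maxlen then PySem.Str.len m else maxlen) acc := by
  induction l generalizing acc with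
  | nil => simp
  | cons x l ih =>
    simp only [List.foldl_cons]
    exact le_trans (by split_ifs <;> omega) (ih _)

-- every motif's length is bounded by B's maxlen fold
theorem len_le_foldl_max (l : List String) (m : String) (hm : m ∈ l) (acc : Int) :
    PySem.Str.len m ≤
      l.foldl (fun maxlen m => if PySem.Str.len m > maxlen then PySem.Str.len m else maxlen) acc := by
  induction l generalizing acc with
  | nil => cases hm
  | cons x l ih =>
    simp only [List.foldl_cons]
    rcases List.mem_cons.mp hm with rfl | hm'
    · exact le_trans (by split_ifs <;> omega) (foldl_max_ge_acc l _)
    · exact ih hm' _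

-- the capped substring-set test agrees with Python's 'in' for motifs not longer than maxlen
theorem contains_subs_eq_isIn (seq m : String) (maxlen : Int)
    (hlenm : PySem.Str.len m ≤ maxlen) :
    ((PySem.List.pyRange 0 (PySem.Str.len seq + 1) 1).foldl
        (fun subs i =>
          (PySem.List.pyRange i (min (i + maxlen) (PySem.Str.len seq) + 1) 1).foldl
            (fun subs j => subs.add (PySem.Str.slice seq (some i) (some j)))
            subs)
        PySem.Set.empty).contains m = PySem.Str.isIn m seq := by
  have hlen : PySem.Str.len seq = (seq.toList.length : Int) := by
    simp [PySem.Str.len_eq]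
  have hlenm' : (m.toList.length : Int) ≤ maxlen := by
    rw [← PySem.Str.len_eq]; exact hlenm
  by_cases h : PySem.Str.isIn m seq = true
  · rw [h, PySem.Set.contains_iff, mem_foldl_foldl_add]
    right
    obtain ⟨t, u, hcat⟩ := (PySem.Str.isIn_iff_infix m seq).mp h
    have hle : t.length + m.toList.length + u.length = seq.toList.length := by
      simpa only [List.length_append] using congrArg List.length hcat
    refine ⟨(t.length : Int), ?_, (t.length : Int) + (m.toList.length : Int), ?_, ?_⟩
    · rw [PySem.List.mem_pyRange_one]; omega
    · rw [PySem.List.mem_pyRange_one]; omega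
    · apply String.toList_inj.mp
      rw [PySem.Str.toList_slice]
      rw [show PySem.Chars.slice seq.toList (some (t.length : Int))
            (some ((t.length : Int) + (m.toList.length : Int)))
          = PySem.List.slice seq.toList (some (t.length : Int))
            (some ((t.length : Int) + (m.toList.length : Int))) from rfl]
      rw [PySem.List.slice_natCast_add seq.toList t.length m.toList.length]
      rw [← hcat, List.append_assoc, List.drop_left, List.take_left]
  · rw [eq_false_of_ne_true h, ← Bool.not_eq_true, PySem.Set.contains_iff,
      mem_foldl_foldl_add]
    rintro (hmem | ⟨i, hi, j, hj, rfl⟩)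
    · simp [PySem.Set.empty] at hmem
    · apply h
      rw [PySem.Str.isIn_iff_infix, PySem.Str.toList_slice]
      have hi' := (PySem.List.mem_pyRange_one).mp hi
      have hj' := (PySem.List.mem_pyRange_one).mp hj
      rw [show PySem.Chars.slice seq.toList (some i) (some j)
            = PySem.List.slice seq.toList (some i) (some j) from rfl,
        PySem.List.slice_toNat seq.toList (by omega) (by omega)]
      exact take_drop_infix _ _ _

-- B's result is the motif list filtered by Python's 'in'
theorem alt_eq_filter_isIn (motif_list : List String) (seq : String) :
    compare_overlaps_alt motif_list seq
      = motif_list.filter (fun m => PySem.Str.isIn m seq) := by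
  unfold compare_overlaps_alt
  apply List.filter_congr
  intro m hm
  exact contains_subs_eq_isIn seq m _ (len_le_foldl_max motif_list m hm 0)

-- ===== VERDICT (by name: the statement is the Claim_ definition above) =====
theorem compare_overlaps_spec : Claim_equal_compare_overlaps := by
  intro motif_list seq _
  unfold Spec_compare_overlaps compare_overlaps
  rw [alt_eq_filter_isIn]
  have hA := PySem.List.foldl_append_if (fun m => PySem.Str.isIn m seq) id motif_list []
  simpa using hA
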